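-- pv_equiv track=rewrite | github.com/hzs0084/CodingInterviews | TikToK/getMinTikTokServerNetworkCost.py | getMinTikTokServerNetworkCost
-- ===== SOURCE A (Python) =====
-- def getMinTikTokServerNetworkCost(x, y):
--     n = len(x)
--     edges = []
--
--     # Construct edges for the MST
--     for i in range(n):
--         for j in range(i + 1, n):
--             cost = min(abs(x[i] - x[j]), abs(y[i] - y[j]))
--             edges.append((cost, i, j))
--
--     # Sort edges by cost
--     edges.sort()
--
--     # Union-Find for Kruskal's algorithm
--     parent = list(range(n))
--     rank = [0] * n
--
--     def find(u):
--         if parent[u] != u: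
--             parent[u] = find(parent[u])
--         return parent[u]
--
--     def union(u, v):
--         root_u = find(u)
--         root_v = find(v)
--         if root_u != root_v:
--             if rank[root_u] > rank[root_v]:
--                 parent[root_v] = root_u
--             elif rank[root_u] < rank[root_v]:
--                 parent[root_u] = root_v
--             else:
--                 parent[root_v] = root_u
--                 rank[root_u] += 1
--
--     # Kruskal's algorithm
--     mst_cost = 0
--     for cost, u, v in edges:
--         if find(u) != find(v):
--             union(u, v)
--             mst_cost += cost
--
--     return mst_cost
-- ===== SOURCE B (Python) =====
-- def getMinTikTokServerNetworkCost(x, y):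
--     n = len(x)
--     edges = [(min(abs(x[i] - x[j]), abs(y[i] - y[j])), i, j)
--              for i in range(n) for j in range(i + 1, n)]
--     edges.sort()
--     # connectivity via a flat component-label array, merged by relabeling
--     comp = list(range(n))
--     total = 0
--     for cost, u, v in edges:
--         cu, cv = comp[u], comp[v]
--         if cu != cv:
--             comp = [cu if c == cv else c for c in comp]
--             total += cost
--     return total
-- ===== Notes on version B (the rewrite author's own statement) =====
-- stated objective: simpler
-- what changed: Kruskal's connectivity is tracked with a flat component-label array merged by a single relabeling pass instead of a recursive path-compressing union-find with ranks; edge generation becomes one comprehension.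
import Mathlib
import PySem

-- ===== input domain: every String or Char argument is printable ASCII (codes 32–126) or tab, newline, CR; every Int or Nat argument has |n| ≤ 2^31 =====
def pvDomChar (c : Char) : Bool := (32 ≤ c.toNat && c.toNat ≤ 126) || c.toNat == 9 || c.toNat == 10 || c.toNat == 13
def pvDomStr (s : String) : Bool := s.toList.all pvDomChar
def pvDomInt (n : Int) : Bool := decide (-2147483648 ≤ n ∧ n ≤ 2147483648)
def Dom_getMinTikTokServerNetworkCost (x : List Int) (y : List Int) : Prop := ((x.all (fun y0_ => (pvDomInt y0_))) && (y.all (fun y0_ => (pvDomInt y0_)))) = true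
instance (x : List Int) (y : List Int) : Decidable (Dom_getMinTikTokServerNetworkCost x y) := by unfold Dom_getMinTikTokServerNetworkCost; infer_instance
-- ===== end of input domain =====

-- B replaces A's recursive path-compressing, rank-based union-find by a flat component-label
-- array merged by one relabeling pass (objective: simpler).

-- ===== PORT A =====
-- Python's recursive `find` with path compression, state-threaded; the fuel argument bounds the
-- recursion depth (fuel = len(parent) suffices on every state A's loop reaches, proved below).
def pvFindA : Nat → List Nat → Nat → List Nat × Nat
  | 0, parent, u => (parent, u)
  | f+1, parent, u =>
    let p := parent.getD u 0
    if p ≠ u then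
      let r := pvFindA f parent p
      (r.1.set u r.2, r.2)
    else (parent, u)

def pvUnionA (parent rank : List Nat) (u v : Nat) : List Nat × List Nat :=
  let f1 := pvFindA parent.length parent u
  let f2 := pvFindA f1.1.length f1.1 v
  if f1.2 ≠ f2.2 then
    if rank.getD f1.2 0 > rank.getD f2.2 0 then (f2.1.set f2.2 f1.2, rank)
    else if rank.getD f1.2 0 < rank.getD f2.2 0 then (f2.1.set f1.2 f2.2, rank)
    else (f2.1.set f2.2 f1.2, rank.set f1.2 (rank.getD f1.2 0 + 1))
  else (f2.1, rank)

-- Python sorts the (cost, i, j) tuples lexicographically: key into the lexicographic product order.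
def pvEdgeKey (e : Int × Nat × Nat) : Lex (Int × Lex (Nat × Nat)) := toLex (e.1, toLex (e.2.1, e.2.2))

-- one iteration of A's Kruskal loop body: `if find(u) != find(v): union(u, v); mst_cost += cost`
def pvStepA (st : List Nat × List Nat × Int) (e : Int × Nat × Nat) : List Nat × List Nat × Int :=
  let f1 := pvFindA st.1.length st.1 e.2.1
  let f2 := pvFindA f1.1.length f1.1 e.2.2
  if f1.2 ≠ f2.2 then
    let ur := pvUnionA f2.1 st.2.1 e.2.1 e.2.2
    (ur.1, ur.2, st.2.2 + e.1)
  else (f2.1, st.2.1, st.2.2)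

-- Indices produced by range(n) are nonnegative, so Nat indices with List.getD are exact here:
-- under Pre_ every x/y access is in range, and parent/rank accesses are in range on every
-- state the loop reaches (proved below).
def getMinTikTokServerNetworkCost (x : List Int) (y : List Int) : Int :=
  let n := x.length
  let edges : List (Int × Nat × Nat) :=
    (List.range n).foldl (fun acc i =>
      (List.range' (i+1) (n - (i+1))).foldl (fun acc2 j =>
        acc2 ++ [(min |x.getD i 0 - x.getD j 0| |y.getD i 0 - y.getD j 0|, i, j)]) acc) []
  let sortedEdges := PySem.List.sorted edges pvEdgeKey
  (sortedEdges.foldl pvStepA (List.range n, List.replicate n 0, 0)).2.2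

-- ===== PORT B =====
-- B's loop body: compare the two component labels; on a merge, relabel v's class to u's label.
def pvStepB (st : List Nat × Int) (e : Int × Nat × Nat) : List Nat × Int :=
  let cu := st.1.getD e.2.1 0
  let cv := st.1.getD e.2.2 0
  if cu ≠ cv then (st.1.map (fun c => if c = cv then cu else c), st.2 + e.1)
  else st

def getMinTikTokServerNetworkCost_alt (x : List Int) (y : List Int) : Int :=
  let n := x.length
  let edges : List (Int × Nat × Nat) :=
    (List.range n).flatMap (fun i =>
      (List.range' (i+1) (n - (i+1))).map (fun j =>
        (min |x.getD i 0 - x.getD j 0| |y.getD i 0 - y.getD j 0|, i, j)))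
  let sortedEdges := PySem.List.sorted edges pvEdgeKey
  (sortedEdges.foldl pvStepB (List.range n, 0)).2

-- ===== PRECONDITION & SPEC =====
-- Pre_ excludes exactly the inputs where Python A raises IndexError (len(x) ≥ 2 and
-- len(y) < len(x): the edge loop reads y[j] for j up to len(x)-1); B raises there too.
def Pre_getMinTikTokServerNetworkCost (x : List Int) (y : List Int) : Prop :=
  x.length ≤ 1 ∨ x.length ≤ y.length
instance (x : List Int) (y : List Int) : Decidable (Pre_getMinTikTokServerNetworkCost x y) := by
  unfold Pre_getMinTikTokServerNetworkCost; infer_instance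

def pvWitness_getMinTikTokServerNetworkCost : List Int × List Int := ([0, 3, 1], [4, 4, 0])

def Spec_getMinTikTokServerNetworkCost (x : List Int) (y : List Int) (out : Int) : Prop := out = getMinTikTokServerNetworkCost_alt x y
instance (x : List Int) (y : List Int) (out : Int) : Decidable (Spec_getMinTikTokServerNetworkCost x y out) := by unfold Spec_getMinTikTokServerNetworkCost; infer_instance

-- ===== CLAIM (what is proved, stated in full; the proofs are below) =====
def Claim_equal_getMinTikTokServerNetworkCost : Prop := ∀ (x : List Int) (y : List Int), Dom_getMinTikTokServerNetworkCost x y → Pre_getMinTikTokServerNetworkCost x y → Spec_getMinTikTokServerNetworkCost x y (getMinTikTokServerNetworkCost x y)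

-- ===== LEMMAS AND PROOFS =====

-- n-fold iteration of the parent map (with getD, matching the ports)
def pvIter (p : List Nat) : Nat → Nat → Nat
  | 0, u => u
  | k+1, u => pvIter p k (p.getD u 0)

-- w reaches the root s (s is a fixpoint of the parent map)
def pvReach (p : List Nat) (w s : Nat) : Prop := (∃ k, pvIter p k w = s) ∧ p.getD s 0 = s

def pvSameRoot (p : List Nat) (i j : Nat) : Prop := ∃ s, pvReach p i s ∧ pvReach p j s

def pvInRange (n : Nat) (p : List Nat) : Prop := ∀ w, w < n → p.getD w 0 < n

-- the simulation invariant: parent is a valid union-find forest whose partition is exactly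
-- the partition induced by equal labels
def pvInv (n : Nat) (parent labels : List Nat) : Prop :=
  parent.length = n ∧ labels.length = n ∧ pvInRange n parent ∧
  (∀ w, w < n → ∃ s, pvReach parent w s) ∧
  (∀ i j, i < n → j < n → (pvSameRoot parent i j ↔ labels.getD i 0 = labels.getD j 0))

lemma pvIter_add (p : List Nat) (a b w : Nat) :
    pvIter p (a + b) w = pvIter p b (pvIter p a w) := by
  induction a generalizing w with
  | zero => simp [pvIter]
  | succ a ih => rw [Nat.succ_add]; simp only [pvIter]; exact ih _

lemma pvIter_fix (p : List Nat) {r : Nat} (h : p.getD r 0 = r) (k : Nat) : pvIter p k r = r := by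
  induction k with
  | zero => rfl
  | succ k ih => simp only [pvIter, h]; exact ih

lemma pvReach_unique {p : List Nat} {w s s' : Nat}
    (h1 : pvReach p w s) (h2 : pvReach p w s') : s = s' := by
  obtain ⟨⟨k1, hk1⟩, hs1⟩ := h1
  obtain ⟨⟨k2, hk2⟩, hs2⟩ := h2
  rcases Nat.le_total k1 k2 with h | h
  · have := pvIter_add p k1 (k2 - k1) w
    rw [Nat.add_sub_cancel' h] at this
    rw [hk1, pvIter_fix p hs1] at this
    rw [← hk2, this]
  · have := pvIter_add p k2 (k1 - k2) w
    rw [Nat.add_sub_cancel' h] at this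
    rw [hk2, pvIter_fix p hs2] at this
    rw [← hk1, this]

lemma pvGetD_set_self {l : List Nat} {i a : Nat} (h : i < l.length) (d : Nat) :
    (l.set i a).getD i d = a := by
  rw [List.getD_eq_getElem?_getD, List.getElem?_set_self (by omega)]; rfl

lemma pvGetD_set_ne {l : List Nat} {i j : Nat} (a : Nat) (h : i ≠ j) (d : Nat) :
    (l.set i a).getD j d = l.getD j d := by
  rw [List.getD_eq_getElem?_getD, List.getElem?_set_ne h, ← List.getD_eq_getElem?_getD]

lemma pvReach_set {p : List Nat} {u r : Nat} (hur : pvReach p u r) :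
    ∀ w s, pvReach p w s → pvReach (p.set u r) w s := by
  rcases Nat.lt_or_ge u p.length with hul | hul
  case inr =>
    rw [List.set_eq_of_length_le (by omega)]
    exact fun w s h => h
  intro w s ⟨⟨k, hk⟩, hs⟩
  induction k generalizing w with
  | zero =>
    simp only [pvIter] at hk
    subst hk
    refine ⟨⟨0, rfl⟩, ?_⟩
    by_cases hsu : w = u
    · subst hsu
      have hru : r = w := pvReach_unique hur ⟨⟨0, rfl⟩, hs⟩
      rw [pvGetD_set_self hul, hru]
    · rw [pvGetD_set_ne _ (fun h => hsu h.symm)]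
      exact hs
  | succ k ih =>
    by_cases hw : p.getD w 0 = w
    · refine ih w ?_
      simpa only [pvIter, hw] using hk
    · by_cases hwu : w = u
      · subst hwu
        have hus : pvReach p w s := ⟨⟨k+1, hk⟩, hs⟩
        have hsr : s = r := pvReach_unique hus hur
        subst hsr
        have hroot : (p.set w s).getD s 0 = s := by
          by_cases hsw : s = w
          · subst hsw; rw [pvGetD_set_self hul]
          · rw [pvGetD_set_ne _ (fun hh => hsw hh.symm)]; exact hs
        exact ⟨⟨1, by simp only [pvIter, pvGetD_set_self hul]⟩, hroot⟩
      · have hreach := ih (p.getD w 0) (by simpa only [pvIter] using hk)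
        obtain ⟨⟨k', hk'⟩, hs'⟩ := hreach
        refine ⟨⟨k' + 1, ?_⟩, hs'⟩
        simp only [pvIter, pvGetD_set_ne _ (fun h => hwu h.symm)]
        exact hk'

lemma pvReach_set_root {p : List Nat} {a b : Nat} (ha : p.getD a 0 = a) (hb : p.getD b 0 = b)
    (hab : a ≠ b) (hbl : b < p.length) :
    ∀ w s, pvReach p w s → pvReach (p.set b a) w (if s = b then a else s) := by
  have hroota : (p.set b a).getD a 0 = a := by
    rw [pvGetD_set_ne _ (fun h => hab h.symm)]; exact ha
  intro w s ⟨⟨k, hk⟩, hs⟩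
  induction k generalizing w with
  | zero =>
    simp only [pvIter] at hk
    subst hk
    by_cases hsb : w = b
    · subst hsb
      rw [if_pos rfl]
      exact ⟨⟨1, by simp only [pvIter, pvGetD_set_self hbl]⟩, hroota⟩
    · simp only [if_neg hsb]
      exact ⟨⟨0, rfl⟩, by rw [pvGetD_set_ne _ (fun h => hsb h.symm)]; exact hs⟩
  | succ k ih =>
    by_cases hw : p.getD w 0 = w
    · exact ih w (by simpa only [pvIter, hw] using hk)
    · have hwb : w ≠ b := fun h => hw (by rw [h]; exact hb)
      have hreach := ih (p.getD w 0) (by simpa only [pvIter] using hk)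
      obtain ⟨⟨k', hk'⟩, hs'⟩ := hreach
      refine ⟨⟨k' + 1, ?_⟩, hs'⟩
      simp only [pvIter, pvGetD_set_ne _ (fun h => hwb h.symm)]
      exact hk'

lemma pvIter_lt {n : Nat} {p : List Nat} (hin : pvInRange n p) {w : Nat} (hw : w < n) (k : Nat) :
    pvIter p k w < n := by
  induction k generalizing w with
  | zero => exact hw
  | succ k ih => exact ih (hin w hw)

lemma pvReach_small {n : Nat} {p : List Nat} (hin : pvInRange n p) {w s : Nat} (hw : w < n)
    (h : pvReach p w s) : ∃ k, k ≤ n ∧ pvIter p k w = s := by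
  obtain ⟨⟨k0, hk0⟩, hs⟩ := h
  have hex : ∃ m, p.getD (pvIter p m w) 0 = pvIter p m w := ⟨k0, by rw [hk0]; exact hs⟩
  set k := Nat.find hex with hkdef
  have hroot : p.getD (pvIter p k w) 0 = pvIter p k w := Nat.find_spec hex
  have hkle : k ≤ k0 := Nat.find_min' hex (by rw [hk0]; exact hs)
  have hiter : pvIter p k w = s := by
    have h1 := pvIter_add p k (k0 - k) w
    rw [Nat.add_sub_cancel' hkle, hk0] at h1
    rw [pvIter_fix p hroot] at h1
    exact h1.symm
  refine ⟨k, ?_, hiter⟩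
  -- pigeonhole: pvIter p 0 w, …, pvIter p k w are k+1 distinct values below n
  have hinj : Function.Injective (fun a : Fin (k+1) => (⟨pvIter p a w, pvIter_lt hin hw a⟩ : Fin n)) := by
    have key : ∀ a b : Fin (k+1), a.val < b.val → pvIter p a.val w ≠ pvIter p b.val w := by
      intro a b hab heq
      have hcalc : pvIter p (a.val + (k - b.val)) w = pvIter p k w := by
        rw [pvIter_add, heq, ← pvIter_add, Nat.add_sub_cancel' (Nat.le_of_lt_succ b.isLt)]
      have hlt : a.val + (k - b.val) < k := by have := b.isLt; omega
      exact Nat.find_min hex hlt (by rw [hcalc]; exact hroot)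
    intro a b heq
    simp only [Fin.mk.injEq] at heq
    rcases lt_trichotomy a.val b.val with h | h | h
    · exact absurd heq (key a b h)
    · exact Fin.ext h
    · exact absurd heq.symm (key b a h)
  have := Fintype.card_le_of_injective _ hinj
  simp only [Fintype.card_fin] at this
  omega

lemma pvFindA_spec {n : Nat} : ∀ (k f : Nat) (p : List Nat) (u : Nat), k ≤ f → p.length = n →
    pvInRange n p → u < n → p.getD (pvIter p k u) 0 = pvIter p k u →
    (pvFindA f p u).2 = pvIter p k u ∧
    (pvFindA f p u).1.length = n ∧
    pvInRange n (pvFindA f p u).1 ∧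
    (∀ w s, pvReach p w s → pvReach (pvFindA f p u).1 w s) := by
  intro k
  induction k with
  | zero =>
    intro f p u hkf hlen hin hu hroot
    simp only [pvIter] at hroot ⊢
    cases f with
    | zero => exact ⟨by trivial, hlen, hin, fun w s h => h⟩
    | succ f => simp only [pvFindA, hroot, ne_eq, not_true_eq_false, if_false]
                exact ⟨by trivial, hlen, hin, fun w s h => h⟩
  | succ k ih =>
    intro f p u hkf hlen hin hu hroot
    by_cases hpu : p.getD u 0 = u
    · have hfix : pvIter p (k+1) u = u := pvIter_fix p hpu (k+1)
      rw [hfix] at hroot ⊢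
      cases f with
      | zero => omega
      | succ f => simp only [pvFindA, hpu, ne_eq, not_true_eq_false, if_false]
                  exact ⟨by trivial, hlen, hin, fun w s h => h⟩
    · cases f with
      | zero => omega
      | succ f =>
        have hstep : pvIter p (k+1) u = pvIter p k (p.getD u 0) := rfl
        have hrec := ih f p (p.getD u 0) (by omega) hlen hin (hin u hu)
          (by rw [← hstep]; exact hroot)
        obtain ⟨h2, hlen', hin', hpres⟩ := hrec
        have hform : pvFindA (f+1) p u =
            ((pvFindA f p (p.getD u 0)).1.set u (pvFindA f p (p.getD u 0)).2,
             (pvFindA f p (p.getD u 0)).2) := by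
          simp only [pvFindA, hpu, ne_eq, not_false_eq_true, if_true]
        rw [hform]
        have hrlt : pvIter p (k+1) u < n := pvIter_lt hin hu (k+1)
        have hreach_u : pvReach p u (pvIter p (k+1) u) := ⟨⟨k+1, rfl⟩, hroot⟩
        have hreach_q : pvReach (pvFindA f p (p.getD u 0)).1 u (pvFindA f p (p.getD u 0)).2 := by
          rw [h2, ← hstep]
          exact hpres u _ hreach_u
        refine ⟨by simpa using h2, by simpa using hlen', ?_, ?_⟩
        · intro w hw
          by_cases hwu : w = u
          · subst hwu
            rw [pvGetD_set_self (by rw [hlen']; exact hw)]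
            rw [h2, ← hstep]; exact hrlt
          · rw [pvGetD_set_ne _ (fun h => hwu h.symm)]
            exact hin' w hw
        · intro w s h
          exact pvReach_set hreach_q w s (hpres w s h)

lemma pvFindA_full {n : Nat} {p : List Nat} {u : Nat} (hlen : p.length = n)
    (hin : pvInRange n p) (htot : ∀ w, w < n → ∃ s, pvReach p w s) (hu : u < n) :
    pvReach p u (pvFindA n p u).2 ∧
    (pvFindA n p u).1.length = n ∧
    pvInRange n (pvFindA n p u).1 ∧
    (∀ w s, pvReach p w s → pvReach (pvFindA n p u).1 w s) := by
  obtain ⟨s, hs⟩ := htot u hu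
  obtain ⟨k, hkn, hk⟩ := pvReach_small hin hu hs
  have hroot : p.getD (pvIter p k u) 0 = pvIter p k u := by rw [hk]; exact hs.2
  obtain ⟨h2, hlen', hin', hpres⟩ := pvFindA_spec (n := n) k n p u hkn hlen hin hu hroot
  exact ⟨by rw [h2]; exact ⟨⟨k, rfl⟩, hroot⟩, hlen', hin', hpres⟩

lemma pvSameRoot_iff_of_pres {n : Nat} {p q : List Nat}
    (hpres : ∀ w s, pvReach p w s → pvReach q w s)
    (htot : ∀ w, w < n → ∃ s, pvReach p w s) {i j : Nat} (hi : i < n) (hj : j < n) :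
    pvSameRoot q i j ↔ pvSameRoot p i j := by
  constructor
  · rintro ⟨s, hqi, hqj⟩
    obtain ⟨si, hsi⟩ := htot i hi
    obtain ⟨sj, hsj⟩ := htot j hj
    have h1 : si = s := pvReach_unique (hpres i si hsi) hqi
    have h2 : sj = s := pvReach_unique (hpres j sj hsj) hqj
    exact ⟨s, h1 ▸ hsi, h2 ▸ hsj⟩
  · rintro ⟨s, hpi, hpj⟩
    exact ⟨s, hpres i s hpi, hpres j s hpj⟩

lemma pvInv_preserve {n : Nat} {p q labels : List Nat} (h : pvInv n p labels)
    (hqlen : q.length = n) (hqin : pvInRange n q)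
    (hpres : ∀ w s, pvReach p w s → pvReach q w s) : pvInv n q labels := by
  obtain ⟨hplen, hllen, hin, htot, hlab⟩ := h
  refine ⟨hqlen, hllen, hqin, ?_, ?_⟩
  · intro w hw
    obtain ⟨s, hs⟩ := htot w hw
    exact ⟨s, hpres w s hs⟩
  · intro i j hi hj
    rw [pvSameRoot_iff_of_pres hpres htot hi hj]
    exact hlab i j hi hj

lemma pvSameRoot_set {n : Nat} {p : List Nat} {a b : Nat} (hplen : p.length = n)
    (hin : pvInRange n p) (htot : ∀ w, w < n → ∃ s, pvReach p w s)
    (ha : p.getD a 0 = a) (hb : p.getD b 0 = b) (hab : a ≠ b) (hbl : b < n)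
    {i j : Nat} (hi : i < n) (hj : j < n) :
    pvSameRoot (p.set b a) i j ↔
      (pvSameRoot p i j ∨ ((pvSameRoot p i a ∨ pvSameRoot p i b) ∧ (pvSameRoot p j a ∨ pvSameRoot p j b))) := by
  obtain ⟨si, hsi⟩ := htot i hi
  obtain ⟨sj, hsj⟩ := htot j hj
  have hra : pvReach p a a := ⟨⟨0, rfl⟩, ha⟩
  have hrb : pvReach p b b := ⟨⟨0, rfl⟩, hb⟩
  have hmap := pvReach_set_root ha hb hab (by omega : b < p.length)
  have hqi := hmap i si hsi
  have hqj := hmap j sj hsj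
  -- characterizations
  have hij : pvSameRoot p i j ↔ si = sj := by
    constructor
    · rintro ⟨s, h1, h2⟩
      rw [pvReach_unique hsi h1, pvReach_unique hsj h2]
    · rintro rfl; exact ⟨si, hsi, hsj⟩
  have hia : pvSameRoot p i a ↔ si = a := by
    constructor
    · rintro ⟨s, h1, h2⟩; rw [pvReach_unique hsi h1, pvReach_unique hra h2]
    · rintro rfl; exact ⟨si, hsi, hra⟩
  have hib : pvSameRoot p i b ↔ si = b := by
    constructor
    · rintro ⟨s, h1, h2⟩; rw [pvReach_unique hsi h1, pvReach_unique hrb h2]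
    · rintro rfl; exact ⟨si, hsi, hrb⟩
  have hja : pvSameRoot p j a ↔ sj = a := by
    constructor
    · rintro ⟨s, h1, h2⟩; rw [pvReach_unique hsj h1, pvReach_unique hra h2]
    · rintro rfl; exact ⟨sj, hsj, hra⟩
  have hjb : pvSameRoot p j b ↔ sj = b := by
    constructor
    · rintro ⟨s, h1, h2⟩; rw [pvReach_unique hsj h1, pvReach_unique hrb h2]
    · rintro rfl; exact ⟨sj, hsj, hrb⟩
  have hq : pvSameRoot (p.set b a) i j ↔
      (if si = b then a else si) = (if sj = b then a else sj) := by
    constructor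
    · rintro ⟨s, h1, h2⟩
      exact (pvReach_unique hqi h1).trans (pvReach_unique hqj h2).symm
    · intro h
      exact ⟨_, hqi, h ▸ hqj⟩
  rw [hq, hij, hia, hib, hja, hjb]
  split_ifs <;> omega

lemma pvGetD_map {l : List Nat} (f : Nat → Nat) {i : Nat} (h : i < l.length) (d : Nat) :
    (l.map f).getD i d = f (l.getD i d) := by
  simp [List.getD_eq_getElem?_getD, List.getElem?_map, List.getElem?_eq_getElem h]

lemma pvGetD_range {n w : Nat} (h : w < n) (d : Nat) : (List.range n).getD w d = w := by
  simp [List.getD_eq_getElem?_getD, h]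

lemma pvSameRoot_root_iff {p : List Nat} {u a : Nat} (h : pvReach p u a) (i : Nat) :
    pvSameRoot p i a ↔ pvSameRoot p i u := by
  have hra : pvReach p a a := ⟨⟨0, rfl⟩, h.2⟩
  constructor
  · rintro ⟨s, h1, h2⟩
    rw [← pvReach_unique hra h2] at h1
    exact ⟨a, h1, h⟩
  · rintro ⟨s, h1, h2⟩
    rw [pvReach_unique h2 h] at h1
    exact ⟨a, h1, hra⟩

lemma pvReach_lt {n : Nat} {p : List Nat} (hin : pvInRange n p) {w s : Nat} (hw : w < n)
    (h : pvReach p w s) : s < n := by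
  obtain ⟨⟨k, hk⟩, _⟩ := h
  rw [← hk]; exact pvIter_lt hin hw k


lemma pvMerge_inv {n : Nat} {p labels : List Nat} {u v a b : Nat}
    (hplen : p.length = n) (hllen : labels.length = n) (hin : pvInRange n p)
    (htot : ∀ w, w < n → ∃ s, pvReach p w s)
    (hlab : ∀ i j, i < n → j < n → (pvSameRoot p i j ↔ labels.getD i 0 = labels.getD j 0))
    (hu : u < n) (hv : v < n)
    (hor : (pvReach p u a ∧ pvReach p v b) ∨ (pvReach p u b ∧ pvReach p v a))
    (hab : a ≠ b) :
    pvInv n (p.set b a)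
      (labels.map (fun c => if c = labels.getD v 0 then labels.getD u 0 else c)) := by
  have ha : p.getD a 0 = a := by rcases hor with ⟨h1, _⟩ | ⟨_, h2⟩; exacts [h1.2, h2.2]
  have hb : p.getD b 0 = b := by rcases hor with ⟨_, h2⟩ | ⟨h1, _⟩; exacts [h2.2, h1.2]
  have hal : a < n := by
    rcases hor with ⟨h1, _⟩ | ⟨_, h2⟩
    exacts [pvReach_lt hin hu h1, pvReach_lt hin hv h2]
  have hbl : b < n := by
    rcases hor with ⟨_, h2⟩ | ⟨h1, _⟩
    exacts [pvReach_lt hin hv h2, pvReach_lt hin hu h1]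
  have hcc : labels.getD u 0 ≠ labels.getD v 0 := by
    intro heq
    have := (hlab u v hu hv).2 heq
    obtain ⟨s, h1, h2⟩ := this
    rcases hor with ⟨hua, hvb⟩ | ⟨hub, hva⟩
    · exact hab ((pvReach_unique hua h1).trans (pvReach_unique hvb h2).symm)
    · exact hab ((pvReach_unique hva h2).trans (pvReach_unique hub h1).symm)
  have key : ∀ i, i < n → ((pvSameRoot p i a ∨ pvSameRoot p i b) ↔
      (labels.getD i 0 = labels.getD u 0 ∨ labels.getD i 0 = labels.getD v 0)) := by
    intro i hi
    rcases hor with ⟨hua, hvb⟩ | ⟨hub, hva⟩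
    · rw [pvSameRoot_root_iff hua, pvSameRoot_root_iff hvb,
        hlab i u hi hu, hlab i v hi hv]
    · rw [pvSameRoot_root_iff hub, pvSameRoot_root_iff hva,
        hlab i u hi hu, hlab i v hi hv]
      exact Or.comm
  have hmap := pvReach_set_root ha hb hab (by omega : b < p.length)
  refine ⟨by simpa using hplen, by simpa using hllen, ?_, ?_, ?_⟩
  · intro w hw
    by_cases hwb : w = b
    · subst hwb
      rw [pvGetD_set_self (by omega)]
      exact hal
    · rw [pvGetD_set_ne _ (fun h => hwb h.symm)]
      exact hin w hw
  · intro w hw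
    obtain ⟨s, hs⟩ := htot w hw
    exact ⟨_, hmap w s hs⟩
  · intro i j hi hj
    rw [pvSameRoot_set hplen hin htot ha hb hab hbl hi hj]
    rw [pvGetD_map _ (by omega), pvGetD_map _ (by omega)]
    rw [hlab i j hi hj]
    have hki := key i hi
    have hkj := key j hj
    rw [hki, hkj]
    have := hcc
    split_ifs <;> omega

lemma pvStep_sim {n : Nat} (parent rank labels : List Nat) (acc : Int) (e : Int × Nat × Nat)
    (h : pvInv n parent labels) (hu : e.2.1 < n) (hv : e.2.2 < n) :
    pvInv n (pvStepA (parent, rank, acc) e).1 (pvStepB (labels, acc) e).1 ∧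
    (pvStepA (parent, rank, acc) e).2.2 = (pvStepB (labels, acc) e).2 := by
  obtain ⟨hplen, hllen, hin, htot, hlab⟩ := h
  obtain ⟨hru, hl1, hi1, hp1⟩ := pvFindA_full hplen hin htot hu
  set q1 := (pvFindA n parent e.2.1).1 with hq1d
  set r1 := (pvFindA n parent e.2.1).2 with hr1d
  have htot1 : ∀ w, w < n → ∃ s, pvReach q1 w s :=
    fun w hw => (htot w hw).imp (fun s hs => hp1 w s hs)
  obtain ⟨hrv, hl2, hi2, hp2⟩ := pvFindA_full hl1 hi1 htot1 hv
  set q2 := (pvFindA n q1 e.2.2).1 with hq2d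
  set r2 := (pvFindA n q1 e.2.2).2 with hr2d
  have htot2 : ∀ w, w < n → ∃ s, pvReach q2 w s :=
    fun w hw => (htot1 w hw).imp (fun s hs => hp2 w s hs)
  have hrv_p : pvReach parent e.2.2 r2 := by
    obtain ⟨sv, hsv⟩ := htot _ hv
    have heq := pvReach_unique (hp1 _ _ hsv) hrv
    rwa [heq] at hsv
  have hcond : r1 = r2 ↔ labels.getD e.2.1 0 = labels.getD e.2.2 0 := by
    rw [← hlab _ _ hu hv]
    constructor
    · intro hh; exact ⟨r2, hh ▸ hru, hrv_p⟩
    · rintro ⟨s, hsu, hsv⟩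
      rw [← pvReach_unique hsu hru, ← pvReach_unique hsv hrv_p]
  have hInv2 : pvInv n q2 labels :=
    pvInv_preserve (pvInv_preserve ⟨hplen, hllen, hin, htot, hlab⟩ hl1 hi1 hp1) hl2 hi2 hp2
  simp only [pvStepA, pvStepB]
  rw [hplen, ← hq1d, ← hr1d, hl1, ← hq2d, ← hr2d]
  by_cases hne : r1 = r2
  · rw [if_neg (by simpa using hne), if_neg (by simpa using hcond.mp hne)]
    exact ⟨hInv2, rfl⟩
  · rw [if_pos (by simpa using hne), if_pos (by simpa using fun hh => hne (hcond.mpr hh))]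
    -- the union call
    obtain ⟨hru3, hl3, hi3, hp3⟩ := pvFindA_full hl2 hi2 htot2 hu
    set q3 := (pvFindA n q2 e.2.1).1 with hq3d
    have he3 : (pvFindA n q2 e.2.1).2 = r1 :=
      pvReach_unique hru3 (hp2 _ _ (hp1 _ _ hru))
    have htot3 : ∀ w, w < n → ∃ s, pvReach q3 w s :=
    fun w hw => (htot2 w hw).imp (fun s hs => hp3 w s hs)
    obtain ⟨hrv4, hl4, hi4, hp4⟩ := pvFindA_full hl3 hi3 htot3 hv
    set q4 := (pvFindA n q3 e.2.2).1 with hq4d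
    have he4 : (pvFindA n q3 e.2.2).2 = r2 :=
      pvReach_unique hrv4 (hp3 _ _ (hp2 _ _ (hp1 _ _ hrv_p)))
    have hInv4 : pvInv n q4 labels :=
      pvInv_preserve (pvInv_preserve hInv2 hl3 hi3 hp3) hl4 hi4 hp4
    obtain ⟨h4len, h4llen, h4in, h4tot, h4lab⟩ := hInv4
    have hreach_u4 : pvReach q4 e.2.1 r1 := hp4 _ _ (hp3 _ _ (hp2 _ _ (hp1 _ _ hru)))
    have hreach_v4 : pvReach q4 e.2.2 r2 := hp4 _ _ (hp3 _ _ (hp2 _ _ (hp1 _ _ hrv_p)))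
    simp only [pvUnionA]
    rw [hl2, ← hq3d, he3, hl3, ← hq4d, he4]
    rw [if_pos (by simpa using hne)]
    refine ⟨?_, ?_⟩
    · split_ifs with hr hr'
      · exact pvMerge_inv h4len h4llen h4in h4tot h4lab hu hv
          (Or.inl ⟨hreach_u4, hreach_v4⟩) hne
      · exact pvMerge_inv h4len h4llen h4in h4tot h4lab hu hv
          (Or.inr ⟨hreach_u4, hreach_v4⟩) (fun hh => hne hh.symm)
      · exact pvMerge_inv h4len h4llen h4in h4tot h4lab hu hv
          (Or.inl ⟨hreach_u4, hreach_v4⟩) hne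
    · trivial

lemma pvFold_sim {n : Nat} : ∀ (L : List (Int × Nat × Nat)) (stA : List Nat × List Nat × Int)
    (stB : List Nat × Int), (∀ e ∈ L, e.2.1 < n ∧ e.2.2 < n) → pvInv n stA.1 stB.1 →
    stA.2.2 = stB.2 → (L.foldl pvStepA stA).2.2 = (L.foldl pvStepB stB).2 := by
  intro L
  induction L with
  | nil => intro stA stB _ _ h; exact h
  | cons e L ih =>
    intro stA stB hmem hInv hacc
    have hstB : stB = (stB.1, stA.2.2) := by rw [hacc]
    rw [List.foldl_cons, List.foldl_cons, hstB]
    obtain ⟨hInv', hacc'⟩ := pvStep_sim stA.1 stA.2.1 stB.1 stA.2.2 e hInv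
      (hmem e (List.mem_cons_self)).1 (hmem e (List.mem_cons_self)).2
    exact ih _ _ (fun e' he' => hmem e' (List.mem_cons_of_mem _ he')) hInv' hacc'

lemma pvInv_init (n : Nat) : pvInv n (List.range n) (List.range n) := by
  have hroot : ∀ w, w < n → (List.range n).getD w 0 = w := fun w hw => pvGetD_range hw 0
  refine ⟨List.length_range, List.length_range, ?_, ?_, ?_⟩
  · intro w hw; rw [hroot w hw]; exact hw
  · intro w hw; exact ⟨w, ⟨0, rfl⟩, hroot w hw⟩
  · intro i j hi hj
    rw [pvGetD_range hi, pvGetD_range hj]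
    constructor
    · rintro ⟨s, h1, h2⟩
      have e1 : i = s := by
        have := pvReach_unique ⟨⟨0, rfl⟩, hroot i hi⟩ h1; exact this
      have e2 : j = s := pvReach_unique ⟨⟨0, rfl⟩, hroot j hj⟩ h2
      omega
    · rintro rfl
      exact ⟨i, ⟨⟨0, rfl⟩, hroot i hi⟩, ⟨⟨0, rfl⟩, hroot i hi⟩⟩

-- ===== VERDICT (by name: the statement is the Claim_ definition above) =====
theorem getMinTikTokServerNetworkCost_spec : Claim_equal_getMinTikTokServerNetworkCost := by
  intro x y hdom hpre
  unfold Spec_getMinTikTokServerNetworkCost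
  simp only [getMinTikTokServerNetworkCost, getMinTikTokServerNetworkCost_alt]
  have hE : ((List.range x.length).foldl (fun acc i =>
      (List.range' (i+1) (x.length - (i+1))).foldl (fun acc2 j =>
        acc2 ++ [(min |x.getD i 0 - x.getD j 0| |y.getD i 0 - y.getD j 0|, i, j)]) acc)
      ([] : List (Int × Nat × Nat))) =
      (List.range x.length).flatMap (fun i =>
      (List.range' (i+1) (x.length - (i+1))).map (fun j =>
        (min |x.getD i 0 - x.getD j 0| |y.getD i 0 - y.getD j 0|, i, j))) := by
    simp only [PySem.List.foldl_append_singleton_eq_map]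
    rw [PySem.List.foldl_append_eq_flatMap]
    simp
  rw [hE]
  apply pvFold_sim _ (List.range x.length, List.replicate x.length 0, 0)
    (List.range x.length, 0) _ (pvInv_init x.length) rfl
  intro e he
  rw [PySem.List.mem_sorted] at he
  obtain ⟨i, hi, he2⟩ := List.mem_flatMap.mp he
  obtain ⟨j, hj, rfl⟩ := List.mem_map.mp he2
  have hi' : i < x.length := List.mem_range.mp hi
  have hj' : i + 1 ≤ j ∧ j < i + 1 + (x.length - (i+1)) := List.mem_range'_1.mp hj
  constructor <;> simp <;> omega
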